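-- pv_equiv track=rewrite | github.com/SHENDUDAYE/LoveMatchApp-english2 | app.py | analyze_zodiac
-- ===== SOURCE A (Python) =====
-- rel_config = {
--     "Six Harmony":   [("Rat","Ox"), ("Tiger","Pig"), ("Rabbit","Dog"),
--                       ("Dragon","Rooster"), ("Snake","Monkey"), ("Horse","Goat")],
--     "Six Clash":     [("Rat","Horse"), ("Ox","Goat"), ("Tiger","Monkey"),
--                       ("Rabbit","Rooster"), ("Dragon","Dog"), ("Snake","Pig")],
--     "Six Harm":      [("Rat","Goat"), ("Ox","Horse"), ("Tiger","Snake"),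
--                       ("Rabbit","Dragon"), ("Dog","Rooster"), ("Monkey","Pig")],
--     "Three Harmony": [["Monkey","Rat","Dragon"],
--                       ["Tiger","Horse","Dog"],
--                       ["Snake","Rooster","Ox"],
--                       ["Pig","Rabbit","Goat"]],
-- }
--
-- def analyze_zodiac(a: str, b: str) -> list[str]:
--     """Return list of Zodiac relations between two signs"""
--     relations = []
--     for rel, pairs in rel_config.items():
--         if rel == "Three Harmony":
--             if any(a in group and b in group for group in pairs):
--                 relations.append(rel)
--         else:
--             if (a,b) in pairs or (b,a) in pairs:
--                 relations.append(rel)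
--     return relations or ["Ordinary"]
-- ===== SOURCE B (Python) =====
-- # Table-lookup reimplementation: pair relations indexed by ordered pair dict, triads by sign->triad id.
-- rel_config = {
--     "Six Harmony":   [("Rat","Ox"), ("Tiger","Pig"), ("Rabbit","Dog"),
--                       ("Dragon","Rooster"), ("Snake","Monkey"), ("Horse","Goat")],
--     "Six Clash":     [("Rat","Horse"), ("Ox","Goat"), ("Tiger","Monkey"),
--                       ("Rabbit","Rooster"), ("Dragon","Dog"), ("Snake","Pig")],
--     "Six Harm":      [("Rat","Goat"), ("Ox","Horse"), ("Tiger","Snake"),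
--                       ("Rabbit","Dragon"), ("Dog","Rooster"), ("Monkey","Pig")],
--     "Three Harmony": [["Monkey","Rat","Dragon"],
--                       ["Tiger","Horse","Dog"],
--                       ["Snake","Rooster","Ox"],
--                       ["Pig","Rabbit","Goat"]],
-- }
--
-- _PAIR_REL = {}
-- for _rel in ("Six Harmony", "Six Clash", "Six Harm"):
--     for _x, _y in rel_config[_rel]:
--         _PAIR_REL[(_x, _y)] = _rel
--         _PAIR_REL[(_y, _x)] = _rel
--
-- _TRIAD_ID = {}
-- for _i, _group in enumerate(rel_config["Three Harmony"]):
--     for _s in _group: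
--         _TRIAD_ID[_s] = _i
--
-- def analyze_zodiac(a: str, b: str) -> list[str]:
--     """Return list of Zodiac relations between two signs"""
--     relations = []
--     pair_rel = _PAIR_REL.get((a, b))
--     if pair_rel is not None:
--         relations.append(pair_rel)
--     ta = _TRIAD_ID.get(a)
--     if ta is not None and ta == _TRIAD_ID.get(b):
--         relations.append("Three Harmony")
--     return relations if relations else ["Ordinary"]
-- ===== Notes on version B (the rewrite author's own statement) =====
-- stated objective: simpler
-- what changed: Replaces A's scan over the four relation categories (membership tests inside a loop over rel_config) with two precomputed tables built once at module load: a dict mapping each ordered sign pair to its pair-relation name, and a dict mapping each sign to its Three-Harmony triad id; analyze_zodiac becomes two direct lookups plus an id comparison.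
import Mathlib
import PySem

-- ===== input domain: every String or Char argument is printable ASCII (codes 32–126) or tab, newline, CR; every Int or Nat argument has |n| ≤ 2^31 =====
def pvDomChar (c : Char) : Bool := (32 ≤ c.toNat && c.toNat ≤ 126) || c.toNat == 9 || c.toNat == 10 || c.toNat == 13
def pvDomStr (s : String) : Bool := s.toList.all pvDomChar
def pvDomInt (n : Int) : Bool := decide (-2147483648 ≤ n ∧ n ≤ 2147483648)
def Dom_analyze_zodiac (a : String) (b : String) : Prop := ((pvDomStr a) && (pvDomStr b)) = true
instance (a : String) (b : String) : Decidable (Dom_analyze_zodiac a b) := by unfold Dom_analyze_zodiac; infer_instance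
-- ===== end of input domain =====

-- B replaces A's four-category scan with a precomputed pair→relation dict lookup plus a sign→triad-id dict comparison (objective: simpler).

-- ===== PORT A =====
-- rel_config values are heterogeneous in Python (pairs vs groups); modelled by a sum type.
inductive ZPayload
  | pairs : List (String × String) → ZPayload
  | groups : List (List String) → ZPayload

def rel_config : List (String × ZPayload) :=
  [("Six Harmony", .pairs [("Rat","Ox"), ("Tiger","Pig"), ("Rabbit","Dog"),
                           ("Dragon","Rooster"), ("Snake","Monkey"), ("Horse","Goat")]),
   ("Six Clash",   .pairs [("Rat","Horse"), ("Ox","Goat"), ("Tiger","Monkey"),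
                           ("Rabbit","Rooster"), ("Dragon","Dog"), ("Snake","Pig")]),
   ("Six Harm",    .pairs [("Rat","Goat"), ("Ox","Horse"), ("Tiger","Snake"),
                           ("Rabbit","Dragon"), ("Dog","Rooster"), ("Monkey","Pig")]),
   ("Three Harmony", .groups [["Monkey","Rat","Dragon"],
                              ["Tiger","Horse","Dog"],
                              ["Snake","Rooster","Ox"],
                              ["Pig","Rabbit","Goat"]])]

def analyze_zodiac (a : String) (b : String) : List String :=
  let relations := rel_config.foldl (fun acc p =>
    if p.1 == "Three Harmony" then
      match p.2 with
      | .groups gs => if gs.any (fun g => g.contains a && g.contains b) then acc ++ [p.1] else acc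
      | .pairs _ => acc
    else
      match p.2 with
      | .pairs ps => if ps.contains (a, b) || ps.contains (b, a) then acc ++ [p.1] else acc
      | .groups _ => acc) []
  if relations.isEmpty then ["Ordinary"] else relations

-- ===== PORT B =====
def b_pair_config : List (String × List (String × String)) :=
  [("Six Harmony", [("Rat","Ox"), ("Tiger","Pig"), ("Rabbit","Dog"),
                    ("Dragon","Rooster"), ("Snake","Monkey"), ("Horse","Goat")]),
   ("Six Clash",   [("Rat","Horse"), ("Ox","Goat"), ("Tiger","Monkey"),
                    ("Rabbit","Rooster"), ("Dragon","Dog"), ("Snake","Pig")]),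
   ("Six Harm",    [("Rat","Goat"), ("Ox","Horse"), ("Tiger","Snake"),
                    ("Rabbit","Dragon"), ("Dog","Rooster"), ("Monkey","Pig")])]

def b_triads : List (List String) :=
  [["Monkey","Rat","Dragon"], ["Tiger","Horse","Dog"],
   ["Snake","Rooster","Ox"], ["Pig","Rabbit","Goat"]]

def pairRelDict : PySem.Dict (String × String) String :=
  b_pair_config.foldl (fun d p =>
    p.2.foldl (fun d xy => (d.insert (xy.1, xy.2) p.1).insert (xy.2, xy.1) p.1) d) PySem.Dict.empty

def triadIdDict : PySem.Dict String Int :=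
  (PySem.List.enumerate b_triads).foldl (fun d ig =>
    ig.2.foldl (fun d s => d.insert s (ig.1 : Int)) d) PySem.Dict.empty

def analyze_zodiac_alt (a : String) (b : String) : List String :=
  let relations :=
    match pairRelDict.get? (a, b) with
    | some r => [r]
    | none => []
  let relations :=
    match triadIdDict.get? a with
    | some ta => if triadIdDict.get? b = some ta then relations ++ ["Three Harmony"] else relations
    | none => relations
  if relations.isEmpty then ["Ordinary"] else relations

-- ===== PRECONDITION & SPEC =====
def Spec_analyze_zodiac (a : String) (b : String) (out : List String) : Prop := out = analyze_zodiac_alt a b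
instance (a : String) (b : String) (out : List String) : Decidable (Spec_analyze_zodiac a b out) := by unfold Spec_analyze_zodiac; infer_instance

-- ===== CLAIM (what is proved, stated in full; the proofs are below) =====
def Claim_equal_analyze_zodiac : Prop := ∀ (a : String) (b : String), Dom_analyze_zodiac a b → Spec_analyze_zodiac a b (analyze_zodiac a b)

-- ===== LEMMAS AND PROOFS =====
def zsigns : List String :=
  ["Rat","Ox","Tiger","Rabbit","Dragon","Snake","Horse","Goat","Monkey","Rooster","Dog","Pig"]

set_option maxRecDepth 8192 in
theorem pairRelDict_eval : pairRelDict = PySem.Dict.mk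
    [(("Rat", "Ox"), "Six Harmony"), (("Ox", "Rat"), "Six Harmony"), (("Tiger", "Pig"), "Six Harmony"),
     (("Pig", "Tiger"), "Six Harmony"), (("Rabbit", "Dog"), "Six Harmony"), (("Dog", "Rabbit"), "Six Harmony"),
     (("Dragon", "Rooster"), "Six Harmony"), (("Rooster", "Dragon"), "Six Harmony"), (("Snake", "Monkey"), "Six Harmony"),
     (("Monkey", "Snake"), "Six Harmony"), (("Horse", "Goat"), "Six Harmony"), (("Goat", "Horse"), "Six Harmony"),
     (("Rat", "Horse"), "Six Clash"), (("Horse", "Rat"), "Six Clash"), (("Ox", "Goat"), "Six Clash"),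
     (("Goat", "Ox"), "Six Clash"), (("Tiger", "Monkey"), "Six Clash"), (("Monkey", "Tiger"), "Six Clash"),
     (("Rabbit", "Rooster"), "Six Clash"), (("Rooster", "Rabbit"), "Six Clash"), (("Dragon", "Dog"), "Six Clash"),
     (("Dog", "Dragon"), "Six Clash"), (("Snake", "Pig"), "Six Clash"), (("Pig", "Snake"), "Six Clash"),
     (("Rat", "Goat"), "Six Harm"), (("Goat", "Rat"), "Six Harm"), (("Ox", "Horse"), "Six Harm"),
     (("Horse", "Ox"), "Six Harm"), (("Tiger", "Snake"), "Six Harm"), (("Snake", "Tiger"), "Six Harm"),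
     (("Rabbit", "Dragon"), "Six Harm"), (("Dragon", "Rabbit"), "Six Harm"), (("Dog", "Rooster"), "Six Harm"),
     (("Rooster", "Dog"), "Six Harm"), (("Monkey", "Pig"), "Six Harm"), (("Pig", "Monkey"), "Six Harm")] := by
  decide

theorem triadIdDict_eval : triadIdDict = PySem.Dict.mk
    [("Monkey", 0), ("Rat", 0), ("Dragon", 0), ("Tiger", 1), ("Horse", 1), ("Dog", 1),
     ("Snake", 2), ("Rooster", 2), ("Ox", 2), ("Pig", 3), ("Rabbit", 3), ("Goat", 3)] := by
  decide

set_option maxRecDepth 8192 in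
theorem key (a b : String) : analyze_zodiac a b = analyze_zodiac_alt a b := by
  by_cases ha : a ∈ zsigns
  · by_cases hb : b ∈ zsigns
    · fin_cases ha <;> fin_cases hb <;> decide
    · simp only [zsigns, List.mem_cons, List.not_mem_nil, or_false, not_or] at hb
      obtain ⟨h1,h2,h3,h4,h5,h6,h7,h8,h9,h10,h11,h12⟩ := hb
      fin_cases ha <;>
        simp [analyze_zodiac, analyze_zodiac_alt, rel_config, pairRelDict_eval, triadIdDict_eval,
          PySem.Dict.get?, h1, h2, h3, h4, h5, h6, h7, h8, h9, h10, h11, h12,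
          Ne.symm h1, Ne.symm h2, Ne.symm h3, Ne.symm h4, Ne.symm h5, Ne.symm h6,
          Ne.symm h7, Ne.symm h8, Ne.symm h9, Ne.symm h10, Ne.symm h11, Ne.symm h12]
  · simp only [zsigns, List.mem_cons, List.not_mem_nil, or_false, not_or] at ha
    obtain ⟨h1,h2,h3,h4,h5,h6,h7,h8,h9,h10,h11,h12⟩ := ha
    simp [analyze_zodiac, analyze_zodiac_alt, rel_config, pairRelDict_eval, triadIdDict_eval,
      PySem.Dict.get?, h1, h2, h3, h4, h5, h6, h7, h8, h9, h10, h11, h12,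
      Ne.symm h1, Ne.symm h2, Ne.symm h3, Ne.symm h4, Ne.symm h5, Ne.symm h6,
      Ne.symm h7, Ne.symm h8, Ne.symm h9, Ne.symm h10, Ne.symm h11, Ne.symm h12]

-- ===== VERDICT (by name: the statement is the Claim_ definition above) =====
theorem analyze_zodiac_spec : Claim_equal_analyze_zodiac := by
  intro a b _
  exact key a b
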